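-- pv_equiv track=rewrite | github.com/luisakisa/programming | 3 курс/5/alg/lab3/lab3.py | ReverseMinus
-- ===== SOURCE A (Python) =====
-- def ReverseMinus(expr):
--   rightExpression = []
--   for i in range(len(expr)):
--     symbol = expr[i]
--     if symbol == '-':
--       if i == 0:
--         rightExpression.append('0')
--       elif expr[i - 1] == '(':
--         rightExpression.append('0')
--     rightExpression.append(symbol)
--   exp = "".join(rightExpression).split()
--   return exp[0]
-- ===== SOURCE B (Python) =====
-- def ReverseMinus(expr):
--     s = expr.replace('(-', '(0-')
--     if expr.startswith('-'):
--         s = '0' + s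
--     return s.split()[0]
-- ===== Notes on version B (the rewrite author's own statement) =====
-- stated objective: simpler
-- what changed: B replaces A's index-based character loop with accumulator by a direct string rewrite: one str.replace of the paren-minus pattern, a conditional leading zero gated on expr.startswith('-'), then split()[0].
import Mathlib
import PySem

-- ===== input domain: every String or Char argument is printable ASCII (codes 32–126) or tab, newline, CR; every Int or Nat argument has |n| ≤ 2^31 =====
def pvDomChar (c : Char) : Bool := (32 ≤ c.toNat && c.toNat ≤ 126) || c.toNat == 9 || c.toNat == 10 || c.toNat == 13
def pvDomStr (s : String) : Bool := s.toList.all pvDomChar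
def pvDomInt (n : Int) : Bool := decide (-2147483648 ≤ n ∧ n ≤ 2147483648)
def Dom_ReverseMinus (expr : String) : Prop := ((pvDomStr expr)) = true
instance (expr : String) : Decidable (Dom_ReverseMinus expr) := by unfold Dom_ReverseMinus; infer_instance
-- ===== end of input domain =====

-- B replaces A's index-based character loop (accumulate, inserting '0' before a minus at
-- position 0 or after '(') by a direct string rewrite: replace "(-" -> "(0-", a conditional
-- leading "0", then split()[0].  Objective: simpler.

-- ===== PORT A =====
-- for i in range(len(expr)): symbol = expr[i]; …  (every index is in range, so the getD default is never used)
def ReverseMinus (expr : String) : String :=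
  let rightExpression : List Char :=
    (PySem.List.pyRange 0 (expr.toList.length : Int) 1).foldl (fun acc i =>
      let symbol := (PySem.List.pyGet? expr.toList i).getD ' '
      let acc :=
        if symbol = '-' then
          if i = 0 then acc ++ ['0']
          else if (PySem.List.pyGet? expr.toList (i - 1)).getD ' ' = '(' then acc ++ ['0']
          else acc
        else acc
      acc ++ [symbol]) []
  let exp := PySem.Chars.split₀ rightExpression
  String.ofList ((PySem.List.pyGet? exp 0).getD [])

-- ===== PORT B =====
def ReverseMinus_alt (expr : String) : String :=
  let s := PySem.Chars.replace expr.toList ['(', '-'] ['(', '0', '-']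
  let s := if PySem.Chars.startswith expr.toList ['-'] then '0' :: s else s
  String.ofList ((PySem.List.pyGet? (PySem.Chars.split₀ s) 0).getD [])

-- ===== PRECONDITION & SPEC =====
-- A raises IndexError (exp[0] on an empty split) exactly when expr is all whitespace; excluded.
def Pre_ReverseMinus (expr : String) : Prop :=
  expr.toList.any (fun c => !(PySem.Chars.isspace c)) = true
instance (expr : String) : Decidable (Pre_ReverseMinus expr) := by
  unfold Pre_ReverseMinus; infer_instance
def pvWitness_ReverseMinus : String := "-(a-b)"

def Spec_ReverseMinus (expr : String) (out : String) : Prop := out = ReverseMinus_alt expr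
instance (expr : String) (out : String) : Decidable (Spec_ReverseMinus expr out) := by unfold Spec_ReverseMinus; infer_instance

-- ===== CLAIM (what is proved, stated in full; the proofs are below) =====
def Claim_equal_ReverseMinus : Prop := ∀ (expr : String), Dom_ReverseMinus expr → Pre_ReverseMinus expr → Spec_ReverseMinus expr (ReverseMinus expr)

-- ===== LEMMAS AND PROOFS =====

-- A's per-character rule, structurally: pvGo2 carries the previous character p and emits
-- '0' before a '-' whose predecessor is '('.
def pvGo2 (p : Char) : List Char → List Char
  | [] => []
  | c :: t => (if c = '-' ∧ p = '(' then ['0', c] else [c]) ++ pvGo2 c t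

def pvAchars : List Char → List Char
  | [] => []
  | c :: t => (if c = '-' then ['0', c] else [c]) ++ pvGo2 c t

-- B's rewrite, structurally: insert '0' between '(' and a following '-'.
def pvMid : List Char → List Char
  | [] => []
  | c :: t => (if c = '(' ∧ t.head? = some '-' then [c, '0'] else [c]) ++ pvMid t

lemma pvGo2_eq (t : List Char) : ∀ p : Char,
    pvGo2 p t = (if p = '(' ∧ t.head? = some '-' then ['0'] else []) ++ pvMid t := by
  induction t with
  | nil => intro p; simp [pvGo2, pvMid]
  | cons c t ih =>
    intro p
    simp only [pvGo2, pvMid, ih c, List.head?_cons, Option.some.injEq]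
    by_cases h1 : c = '-' <;> by_cases h2 : p = '(' <;>
      by_cases h3 : t.head? = some '-' <;>
        by_cases h4 : c = '(' <;> simp [h1, h2, h3, h4]

lemma pvAchars_eq_mid (l : List Char) :
    pvAchars l = (if l.head? = some '-' then ['0'] else []) ++ pvMid l := by
  cases l with
  | nil => simp [pvAchars, pvMid]
  | cons c t =>
    simp only [pvAchars, pvGo2_eq t c, List.head?_cons, Option.some.injEq, pvMid]
    by_cases h1 : c = '-' <;> by_cases h3 : t.head? = some '-' <;>
      by_cases h4 : c = '(' <;> simp [h1, h3, h4]

-- the replace "(-" -> "(0-" scan computes pvMid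
lemma pvReplace_go_eq : ∀ (fuel : Nat) (l acc : List Char), l.length ≤ fuel →
    PySem.Chars.replace.go ['(', '-'] ['(', '0', '-'] fuel l acc = acc.reverse ++ pvMid l := by
  intro fuel
  induction fuel with
  | zero =>
    intro l acc h
    have : l = [] := List.eq_nil_of_length_eq_zero (Nat.le_zero.mp h)
    subst this
    simp [PySem.Chars.replace.go, pvMid]
  | succ n ih =>
    intro l acc h
    cases l with
    | nil => simp [PySem.Chars.replace.go, pvMid]
    | cons c t =>
      by_cases hp : List.isPrefixOf ['(', '-'] (c :: t)
      · obtain ⟨hc, t', ht⟩ : c = '(' ∧ ∃ t', t = '-' :: t' := by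
          cases t with
          | nil => simp [List.isPrefixOf] at hp
          | cons d t' =>
            simp [List.isPrefixOf] at hp
            exact ⟨hp.1.symm, t', by rw [← hp.2]⟩
        subst hc; subst ht
        rw [show PySem.Chars.replace.go ['(', '-'] ['(', '0', '-'] (n+1) ('(' :: '-' :: t') acc
              = PySem.Chars.replace.go ['(', '-'] ['(', '0', '-'] n t' (['-', '0', '('] ++ acc) from by
          simp [PySem.Chars.replace.go, List.isPrefixOf]]
        rw [ih t' _ (by simp at h; omega)]
        simp [pvMid]
      · rw [show PySem.Chars.replace.go ['(', '-'] ['(', '0', '-'] (n+1) (c :: t) acc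
              = PySem.Chars.replace.go ['(', '-'] ['(', '0', '-'] n t (c :: acc) from by
          simp [PySem.Chars.replace.go, hp]]
        rw [ih t _ (by simp at h; omega)]
        have hnot : ¬ (c = '(' ∧ t.head? = some '-') := by
          intro ⟨hc, ht⟩
          cases t with
          | nil => simp at ht
          | cons d t' =>
            simp at ht
            exact hp (by simp [List.isPrefixOf, hc, ht])
        simp [pvMid, hnot]

lemma pvReplace_eq (l : List Char) :
    PySem.Chars.replace l ['(', '-'] ['(', '0', '-'] = pvMid l := by
  rw [PySem.Chars.replace]
  simp only [List.isEmpty_cons, if_false, Bool.false_eq_true]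
  exact pvReplace_go_eq l.length l [] le_rfl

-- snoc characterisation of pvGo2 / pvAchars, used to absorb A's left fold
lemma pvGo2_snoc (xs : List Char) : ∀ (p c : Char),
    pvGo2 p (xs ++ [c]) = pvGo2 p xs ++
      (if c = '-' ∧ xs.getLast?.getD p = '(' then ['0', c] else [c]) := by
  induction xs with
  | nil => intro p c; simp [pvGo2]
  | cons x xs ih =>
    intro p c
    simp only [List.cons_append, pvGo2, ih x, List.append_assoc]
    congr 2
    cases xs <;> simp [List.getLast?_cons]

lemma pvAchars_snoc (xs : List Char) (c : Char) :
    pvAchars (xs ++ [c]) = pvAchars xs ++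
      (if c = '-' ∧ (xs = [] ∨ xs.getLast? = some '(') then ['0', c] else [c]) := by
  cases xs with
  | nil => simp [pvAchars, pvGo2]
  | cons x xs =>
    simp only [List.cons_append, pvAchars, pvGo2_snoc, List.append_assoc]
    congr 2
    rw [List.getLast?_cons]
    by_cases h : xs.getLast?.getD x = '(' <;> simp [h]

-- A's indexed fold over range(len(expr)) computes pvAchars
lemma pvFold_eq_achars (l : List Char) :
    (PySem.List.pyRange 0 (l.length : Int) 1).foldl (fun acc i =>
      let symbol := (PySem.List.pyGet? l i).getD ' '
      let acc :=
        if symbol = '-' then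
          if i = 0 then acc ++ ['0']
          else if (PySem.List.pyGet? l (i - 1)).getD ' ' = '(' then acc ++ ['0']
          else acc
        else acc
      acc ++ [symbol]) [] = pvAchars l := by
  suffices h : ∀ k : Nat, k ≤ l.length →
      (PySem.List.pyRange 0 (k : Int) 1).foldl (fun acc i =>
        let symbol := (PySem.List.pyGet? l i).getD ' '
        let acc :=
          if symbol = '-' then
            if i = 0 then acc ++ ['0']
            else if (PySem.List.pyGet? l (i - 1)).getD ' ' = '(' then acc ++ ['0']
            else acc
          else acc
        acc ++ [symbol]) [] = pvAchars (l.take k) by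
    simpa using h l.length le_rfl
  intro k
  induction k with
  | zero => intro _; simp [PySem.List.pyRange_one_eq_nil, pvAchars]
  | succ k ih =>
    intro hk
    have hk' : k < l.length := hk
    have hcast : ((k + 1 : Nat) : Int) = (k : Int) + 1 := by push_cast; ring
    rw [hcast, PySem.List.pyRange_one_succ_right (a := 0) (b := (k : Int)) (Int.natCast_nonneg k),
        List.foldl_append, ih (le_of_lt hk')]
    simp only [List.foldl_cons, List.foldl_nil]
    rw [List.take_add_one]
    have hget : l[k]? = some l[k] := List.getElem?_eq_getElem hk'
    rw [hget]
    simp only [Option.toList_some]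
    rw [pvAchars_snoc]
    have h1 : (PySem.List.pyGet? l (k : Int)).getD ' ' = l[k] := by
      simp [PySem.List.pyGet?_natCast, hget]
    by_cases hs : l[k] = '-'
    · rw [h1, if_pos hs]
      by_cases h0 : k = 0
      · subst h0
        simp [hs]
      · have hne : ((k : Int)) ≠ 0 := by exact_mod_cast h0
        rw [if_neg hne]
        have hk1 : ((k : Int) - 1) = ((k - 1 : Nat) : Int) := by omega
        have hprev : (PySem.List.pyGet? l ((k : Int) - 1)).getD ' ' = l[k - 1] := by
          rw [hk1]
          simp [PySem.List.pyGet?_natCast, List.getElem?_eq_getElem (show k - 1 < l.length by omega)]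
        have hlast : (l.take k).getLast? = some l[k - 1] := by
          have h2 : l.take k = l.take (k - 1) ++ [l[k - 1]] := by
            conv_lhs => rw [show k = (k - 1) + 1 from by omega]
            rw [List.take_add_one, List.getElem?_eq_getElem (show k - 1 < l.length by omega)]
            simp
          rw [h2, List.getLast?_append]
          simp
        have htk : ¬ (l.take k = []) := by
          intro h2; rw [h2] at hlast; simp at hlast
        by_cases hpr : l[k - 1] = '('
        · rw [hprev, if_pos hpr, if_pos ⟨hs, Or.inr (by rw [hlast, hpr])⟩]
          simp
        · rw [hprev, if_neg hpr]
          rw [if_neg (show ¬ (l[k] = '-' ∧ (l.take k = [] ∨ (l.take k).getLast? = some '(')) from by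
            rintro ⟨_, h2 | h2⟩
            · exact htk h2
            · rw [hlast] at h2; exact hpr (by injection h2))]
    · rw [h1, if_neg hs]
      rw [if_neg (show ¬ (l[k] = '-' ∧ (l.take k = [] ∨ (l.take k).getLast? = some '(')) from by
        rintro ⟨h2, _⟩; exact hs h2)]

-- B's head-conditional prepend matches A's leading-minus rule
lemma pvBchars_eq (l : List Char) :
    (if PySem.Chars.startswith l ['-'] then '0' :: pvMid l else pvMid l) = pvAchars l := by
  rw [pvAchars_eq_mid]
  by_cases h : l.head? = some '-'
  · have hs : PySem.Chars.startswith l ['-'] = true := by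
      rw [PySem.Chars.startswith_iff]
      cases l with
      | nil => simp at h
      | cons c t => simp at h; simp [h]
    simp [hs, h]
  · have hs : PySem.Chars.startswith l ['-'] = false := by
      rw [Bool.eq_false_iff]
      intro hc
      rw [PySem.Chars.startswith_iff] at hc
      cases l with
      | nil => simp at hc
      | cons c t =>
        rcases hc with ⟨t', ht⟩
        simp at ht
        refine h ?_
        simp only [List.head?_cons, Option.some.injEq]
        exact ht.1.symm
    simp [hs, h]

-- ===== VERDICT (by name: the statement is the Claim_ definition above) =====
theorem ReverseMinus_spec : Claim_equal_ReverseMinus := by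
  intro expr _ _
  unfold Spec_ReverseMinus ReverseMinus ReverseMinus_alt
  simp only [pvFold_eq_achars, pvReplace_eq, pvBchars_eq]
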